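-- pv_equiv track=rewrite | github.com/Liwenbin1996/Data_Structures_and_Algorithms | String.py | removeKZeros
-- ===== SOURCE A (Python) =====
-- def removeKZeros(str1, k):
--     if str1 == None or k < 1:
--         return str1
--     count = 0
--     start = -1
--     chas = list(str1)
--     for i in range(len(chas)):
--         if chas[i] == '0':
--             count += 1
--             start = i if start == -1 else start
--         else:
--             if count == k:
--                 while count > 0:
--                     chas[start] = ""
--                     start += 1
--                     count -= 1
--             count = 0
--             start = -1
--     if count == k:
--         while count > 0:
--             chas[start] = ""
--             start += 1
--             count -= 1
--     return ''.join(chas)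
-- ===== SOURCE B (Python) =====
-- def removeKZeros(str1, k):
--     if str1 == None or k < 1:
--         return str1
--     out = []
--     i, n = 0, len(str1)
--     while i < n:
--         j = i
--         while j < n and str1[j] == str1[i]:
--             j += 1
--         if not (str1[i] == '0' and j - i == k):
--             out.append(str1[i:j])
--         i = j
--     return ''.join(out)
-- ===== Notes on version B (the rewrite author's own statement) =====
-- stated objective: simpler
-- what changed: Replaces A's index/count/start state machine that blanks cells of a mutable char list in place with a two-pointer group-then-filter pass: split the string into maximal runs and keep every run except zero-runs of length exactly k.
import Mathlib
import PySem

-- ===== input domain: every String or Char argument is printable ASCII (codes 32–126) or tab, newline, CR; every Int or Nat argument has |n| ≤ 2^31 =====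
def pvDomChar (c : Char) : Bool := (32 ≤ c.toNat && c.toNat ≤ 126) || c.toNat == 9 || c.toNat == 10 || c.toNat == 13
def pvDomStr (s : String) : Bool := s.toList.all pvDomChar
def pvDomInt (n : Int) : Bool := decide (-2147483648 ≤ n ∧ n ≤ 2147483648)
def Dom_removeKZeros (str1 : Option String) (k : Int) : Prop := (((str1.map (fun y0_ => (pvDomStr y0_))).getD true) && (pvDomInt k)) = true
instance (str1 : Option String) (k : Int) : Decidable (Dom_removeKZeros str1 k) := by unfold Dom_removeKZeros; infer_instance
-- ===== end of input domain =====

-- B replaces A's in-place blanking state machine (count/start over a mutable char list)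
-- with a group-then-filter pass over maximal character runs; same O(n) cost, simpler.


-- ===== PORT A =====
def pvSing (c : Char) : String := String.ofList [c]

-- the inner 'while count > 0: chas[start] = ""; start += 1; count -= 1'
-- (the loop runs exactly count.toNat times, decrementing count to 0)
def pvBlankGo : List String → Int → Nat → List String
  | chas, _, 0 => chas
  | chas, start, n + 1 => pvBlankGo (chas.set start.toNat "") (start + 1) n

def pvBlank (chas : List String) (start count : Int) : List String :=
  pvBlankGo chas start count.toNat

-- one iteration of the 'for i in range(len(chas))' loop body, state (chas, count, start)
def pvStepA (k : Int) (st : List String × Int × Int) (i : Nat) : List String × Int × Int :=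
  let (chas, count, start) := st
  if chas.getD i "" = "0" then
    (chas, count + 1, if start = -1 then (i : Int) else start)
  else
    ((if count = k then pvBlank chas start count else chas), 0, -1)

def removeKZeros (str1 : Option String) (k : Int) : Option String :=
  match str1 with
  | none => none
  | some s =>
    if k < 1 then some s
    else
      let chas := s.toList.map pvSing
      let r := (List.range chas.length).foldl (pvStepA k) (chas, 0, -1)
      let chas2 := if r.2.1 = k then pvBlank r.1 r.2.2 r.2.1 else r.1
      some (String.join chas2)

-- ===== PORT B =====
theorem pvRuns_dec (c : Char) (cs' : List Char) :
    (cs'.dropWhile (· == c)).length < (c :: cs').length := by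
  have := List.length_dropWhile_le (fun x => x == c) cs'
  simp only [List.length_cons]
  omega

-- maximal runs of identical characters (the two-pointer grouping pass)
def pvRuns (cs : List Char) : List (List Char) :=
  match cs with
  | [] => []
  | c :: cs' => (c :: cs'.takeWhile (· == c)) :: pvRuns (cs'.dropWhile (· == c))
termination_by cs.length
decreasing_by exact pvRuns_dec c cs'

def removeKZeros_alt (str1 : Option String) (k : Int) : Option String :=
  match str1 with
  | none => none
  | some s =>
    if k < 1 then some s
    else
      some (String.join
        (((pvRuns s.toList).filter
            (fun r => !(r.head? == some '0' && (r.length : Int) == k))).map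
          (fun r => String.ofList r)))

-- ===== PRECONDITION & SPEC =====
def Spec_removeKZeros (str1 : Option String) (k : Int) (out : Option String) : Prop := out = removeKZeros_alt str1 k
instance (str1 : Option String) (k : Int) (out : Option String) : Decidable (Spec_removeKZeros str1 k out) := by unfold Spec_removeKZeros; infer_instance

-- ===== CLAIM (what is proved, stated in full; the proofs are below) =====
def Claim_equal_removeKZeros : Prop := ∀ (str1 : Option String) (k : Int), Dom_removeKZeros str1 k → Spec_removeKZeros str1 k (removeKZeros str1 k)

-- ===== LEMMAS AND PROOFS =====

-- pure recursive description of A's loop result: P = finished pieces, z = pending zeros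
def runA (k : Int) (P : List String) (z : Nat) (rest : List Char) : List String × Nat :=
  match rest with
  | [] => (P, z)
  | c :: cs =>
    if c = '0' then runA k P (z + 1) cs
    else runA k (P ++ (if (z : Int) = k then List.replicate z "" else List.replicate z "0")
                   ++ [pvSing c]) 0 cs

-- reference spec: drop zero-runs of length exactly k, with z pending zeros carried
def specK (k : Int) (z : Nat) : List Char → List Char
  | [] => if (z : Int) = k then [] else List.replicate z '0'
  | c :: cs =>
    if c = '0' then specK k (z + 1) cs
    else (if (z : Int) = k then [] else List.replicate z '0') ++ c :: specK k 0 cs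

theorem set_at_len (P : List String) (y x : String) (l : List String) :
    (P ++ x :: l).set P.length y = P ++ y :: l := by
  induction P with
  | nil => rfl
  | cons a t ih => simp [ih]

theorem getD_at_len (P : List String) (x : String) (l : List String) :
    (P ++ x :: l).getD P.length "" = x := by
  induction P with
  | nil => rfl
  | cons a t ih => simpa using ih

theorem rep_snoc {α : Type} (z : Nat) (x : α) (l : List α) :
    List.replicate z x ++ x :: l = List.replicate (z + 1) x ++ l := by
  rw [List.replicate_succ', List.append_assoc]
  rfl

theorem pvBlank_spec (z : Nat) (P R : List String) :
    pvBlank (P ++ List.replicate z "0" ++ R) (P.length) z = P ++ List.replicate z "" ++ R := by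
  unfold pvBlank
  rw [show ((z : Int)).toNat = z by omega]
  induction z generalizing P with
  | zero => simp [pvBlankGo]
  | succ n ih =>
    show pvBlankGo ((P ++ List.replicate (n + 1) "0" ++ R).set ((P.length : Int)).toNat "")
        ((P.length : Int) + 1) n = P ++ List.replicate (n + 1) "" ++ R
    rw [show ((P.length : Int)).toNat = P.length by omega]
    have hset : (P ++ List.replicate (n + 1) "0" ++ R).set P.length ""
        = (P ++ [""]) ++ List.replicate n "0" ++ R := by
      rw [List.replicate_succ]
      simpa using set_at_len P "" "0" (List.replicate n "0" ++ R)
    rw [hset, show ((P.length : Int) + 1) = ((P ++ [""]).length : Int) by simp, ih (P ++ [""])]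
    simp [List.replicate_succ]

theorem pvSing_eq_zero (c : Char) : (pvSing c = "0") ↔ c = '0' := by
  constructor
  · intro h
    have := congrArg String.toList h
    simp [pvSing] at this
    simpa using this
  · intro h; subst h; rfl

theorem pvLoopA_spec (k : Int) (hk : 1 ≤ k) (rest : List Char) (P : List String) (z : Nat) :
    (List.range' (P.length + z) rest.length).foldl (pvStepA k)
      (P ++ List.replicate z "0" ++ rest.map pvSing, (z : Int),
        if z = 0 then -1 else (P.length : Int))
    = ((runA k P z rest).1 ++ List.replicate (runA k P z rest).2 "0",
       ((runA k P z rest).2 : Int),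
       (if (runA k P z rest).2 = 0 then -1 else ((runA k P z rest).1.length : Int))) := by
  induction rest generalizing P z with
  | nil =>
    simp [runA, List.range'_zero]
  | cons c cs ih =>
    rw [List.length_cons, List.range'_succ, List.foldl_cons]
    have hget : (P ++ List.replicate z "0" ++ (c :: cs).map pvSing).getD (P.length + z) ""
        = pvSing c := by
      have := getD_at_len (P ++ List.replicate z "0") (pvSing c) (cs.map pvSing)
      simpa using this
    by_cases hc : c = '0'
    · have hstep : pvStepA k (P ++ List.replicate z "0" ++ (c :: cs).map pvSing, (z : Int),
          if z = 0 then -1 else (P.length : Int)) (P.length + z)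
          = (P ++ List.replicate (z + 1) "0" ++ cs.map pvSing, ((z + 1 : Nat) : Int),
             if z + 1 = 0 then -1 else (P.length : Int)) := by
        show (if (P ++ List.replicate z "0" ++ (c :: cs).map pvSing).getD (P.length + z) "" = "0"
            then _ else _) = _
        rw [hget, if_pos ((pvSing_eq_zero c).mpr hc)]
        have hstart : (if (if z = 0 then (-1 : Int) else (P.length : Int)) = -1
            then ((P.length + z : Nat) : Int) else (if z = 0 then -1 else (P.length : Int)))
            = (if z + 1 = 0 then -1 else (P.length : Int)) := by
          by_cases hz : z = 0
          · simp [hz]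
          · simp [hz]
        have hchas : P ++ List.replicate z "0" ++ (c :: cs).map pvSing
            = P ++ List.replicate (z + 1) "0" ++ cs.map pvSing := by
          subst hc
          rw [List.map_cons, show pvSing '0' = "0" from rfl, List.append_assoc,
            List.append_assoc, rep_snoc]
        rw [hstart, hchas, show ((z : Int) + 1) = ((z + 1 : Nat) : Int) by omega]
      rw [hstep, show P.length + z + 1 = P.length + (z + 1) by omega, ih P (z + 1)]
      simp [runA, hc]
    · have hmid : pvStepA k (P ++ List.replicate z "0" ++ (c :: cs).map pvSing, (z : Int),
          if z = 0 then -1 else (P.length : Int)) (P.length + z)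
          = ((P ++ (if (z : Int) = k then List.replicate z "" else List.replicate z "0")
               ++ [pvSing c]) ++ List.replicate 0 "0" ++ cs.map pvSing, ((0 : Nat) : Int),
             if (0 : Nat) = 0 then -1 else (((P ++ (if (z : Int) = k then List.replicate z ""
               else List.replicate z "0") ++ [pvSing c]).length : Int))) := by
        show (if (P ++ List.replicate z "0" ++ (c :: cs).map pvSing).getD (P.length + z) "" = "0"
            then _ else _) = _
        rw [hget, if_neg (fun h => hc ((pvSing_eq_zero c).mp h))]
        by_cases hzk : (z : Int) = k
        · have hz0 : z ≠ 0 := by omega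
          rw [if_pos hzk, if_pos hzk, if_neg hz0]
          rw [pvBlank_spec z P ((c :: cs).map pvSing)]
          simp
        · rw [if_neg hzk, if_neg hzk]
          simp
      rw [hmid, show P.length + z + 1
          = (P ++ (if (z : Int) = k then List.replicate z "" else List.replicate z "0")
             ++ [pvSing c]).length + 0 by split <;> simp <;> omega,
        ih (P ++ (if (z : Int) = k then List.replicate z "" else List.replicate z "0")
             ++ [pvSing c]) 0]
      by_cases hzk : (z : Int) = k
      · simp [runA, hc, hzk]
      · simp [runA, hc, hzk]

theorem join_foldl (l : List String) (s : String) :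
    l.foldl (fun r t => r ++ t) s = s ++ String.join l := by
  induction l generalizing s with
  | nil => simp [String.join]
  | cons x t ih =>
    show t.foldl (fun r t => r ++ t) (s ++ x) = s ++ String.join (x :: t)
    rw [ih]
    show s ++ x ++ String.join t = s ++ t.foldl (fun r t => r ++ t) ("" ++ x)
    rw [ih]
    simp [String.append_assoc]

theorem join_cons (x : String) (t : List String) :
    String.join (x :: t) = x ++ String.join t := by
  show t.foldl (fun r t => r ++ t) ("" ++ x) = x ++ String.join t
  rw [join_foldl]
  simp

theorem join_append (a b : List String) :
    String.join (a ++ b) = String.join a ++ String.join b := by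
  induction a with
  | nil => simp [String.join]
  | cons x t ih => rw [List.cons_append, join_cons, join_cons, ih, String.append_assoc]

theorem ofList_append (a b : List Char) :
    String.ofList (a ++ b) = String.ofList a ++ String.ofList b := by
  simp

theorem ofList_cons (c : Char) (l : List Char) :
    String.ofList (c :: l) = String.ofList [c] ++ String.ofList l := by
  rw [show (c :: l) = [c] ++ l from rfl, ofList_append]

theorem join_replicate_zero (z : Nat) :
    String.join (List.replicate z "0") = String.ofList (List.replicate z '0') := by
  induction z with
  | zero => rfl
  | succ n ih =>
    rw [List.replicate_succ, join_cons, ih, List.replicate_succ, ofList_cons]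

theorem join_replicate_empty (z : Nat) :
    String.join (List.replicate z "") = "" := by
  induction z with
  | zero => rfl
  | succ n ih => rw [List.replicate_succ, join_cons, ih]; rfl

theorem runA_join (k : Int) (hk : 1 ≤ k) (cs : List Char) (z : Nat) (P : List String) :
    String.join (if ((runA k P z cs).2 : Int) = k
        then (runA k P z cs).1 ++ List.replicate (runA k P z cs).2 ""
        else (runA k P z cs).1 ++ List.replicate (runA k P z cs).2 "0")
    = String.join P ++ String.ofList (specK k z cs) := by
  induction cs generalizing P z with
  | nil =>
    by_cases hzk : (z : Int) = k <;>
      simp [runA, specK, hzk, join_append, join_replicate_zero, join_replicate_empty]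
  | cons c cs ih =>
    by_cases hc : c = '0'
    · rw [show runA k P z (c :: cs) = runA k P (z + 1) cs by simp [runA, hc]]
      rw [ih (z + 1) P]
      simp [specK, hc]
    · rw [show runA k P z (c :: cs)
          = runA k (P ++ (if (z : Int) = k then List.replicate z "" else List.replicate z "0")
              ++ [pvSing c]) 0 cs by simp [runA, hc]]
      rw [ih 0 _]
      have hsing : String.join [pvSing c] = String.ofList [c] := by
        rw [join_cons]
        show String.ofList [c] ++ String.join [] = String.ofList [c]
        simp [String.join]
      have hspec : specK k z (c :: cs)
          = (if (z : Int) = k then [] else List.replicate z '0') ++ c :: specK k 0 cs := by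
        simp [specK, hc]
      by_cases hzk : (z : Int) = k
      · rw [if_pos hzk, hspec, if_pos hzk, join_append, join_append, hsing,
          join_replicate_empty, List.nil_append, ofList_cons]
        simp [String.append_assoc]
        exact (ofList_cons _ _).symm
      · rw [if_neg hzk, hspec, if_neg hzk, join_append, join_append, hsing,
          join_replicate_zero, ofList_append, ofList_cons]
        simp [String.append_assoc]
        exact (ofList_cons _ _).symm

-- specK passes a non-zero prefix through unchanged
theorem specK_nonzero (k : Int) (hk : 1 ≤ k) (t : List Char) (rest : List Char)
    (h : ∀ c ∈ t, c ≠ '0') : specK k 0 (t ++ rest) = t ++ specK k 0 rest := by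
  induction t with
  | nil => rfl
  | cons c cs ih =>
    have hc : c ≠ '0' := h c (by simp)
    have h0 : ((0 : Nat) : Int) ≠ k := by omega
    simp only [List.cons_append, specK, if_neg hc, if_neg h0]
    rw [ih (fun x hx => h x (by simp [hx]))]
    simp

-- specK accumulates a zero run, then flushes it before a non-zero head (or at the end)
theorem specK_zeros (k : Int) (hk : 1 ≤ k) (m : Nat) (z : Nat) (rest : List Char)
    (h : ∀ d, rest.head? = some d → d ≠ '0') :
    specK k z (List.replicate m '0' ++ rest)
    = (if ((z + m : Nat) : Int) = k then [] else List.replicate (z + m) '0')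
      ++ specK k 0 rest := by
  induction m generalizing z with
  | zero =>
    cases rest with
    | nil => simp [specK]
    | cons d ds =>
      have hd : d ≠ '0' := h d rfl
      simp [specK, hd]
  | succ n ih =>
    have h1 : specK k z (List.replicate (n + 1) '0' ++ rest)
        = specK k (z + 1) (List.replicate n '0' ++ rest) := by
      simp [List.replicate_succ, specK]
    rw [h1, ih (z + 1)]
    have h2 : z + 1 + n = z + (n + 1) := by omega
    rw [h2]

theorem takeWhile_all {c : Char} (l : List Char) :
    ∀ x ∈ l.takeWhile (· == c), x = c := by
  intro x hx
  have hmem := List.mem_takeWhile_imp hx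
  simpa using hmem

theorem head_dropWhile {c : Char} (l : List Char) :
    ∀ d, (l.dropWhile (· == c)).head? = some d → d ≠ c := by
  intro d hd
  have := List.head?_dropWhile_not (p := (· == c)) (l := l)
  intro h
  subst h
  rw [hd] at this
  simp at this

theorem runsB_spec (k : Int) (hk : 1 ≤ k) (cs : List Char) :
    ((pvRuns cs).filter
        (fun r => !(r.head? == some '0' && (r.length : Int) == k))).flatten
    = specK k 0 cs := by
  induction hn : cs.length using Nat.strong_induction_on generalizing cs with
  | _ n ih =>
    cases cs with
    | nil => subst hn; simp [pvRuns, specK]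
    | cons c cs' =>
      subst hn
      unfold pvRuns
      have hrest : (cs'.dropWhile (· == c)).length < (c :: cs').length := by
        have := List.length_dropWhile_le (fun x => x == c) cs'
        simp; omega
      have ihr := ih _ hrest (cs'.dropWhile (· == c)) rfl
      have hsplit : c :: cs' = (c :: cs'.takeWhile (· == c)) ++ cs'.dropWhile (· == c) := by
        simp [List.takeWhile_append_dropWhile]
      by_cases hc : c = '0'
      · subst hc
        have hrun : ('0' : Char) :: cs'.takeWhile (· == '0')
            = List.replicate (cs'.takeWhile (· == '0')).length.succ '0' := by
          refine List.eq_replicate_iff.mpr ⟨by simp, ?_⟩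
          intro x hx
          rcases List.mem_cons.mp hx with h | h
          · exact h
          · exact takeWhile_all cs' x h
        by_cases hlen : ((cs'.takeWhile (· == '0')).length.succ : Int) = k
        · rw [List.filter_cons_of_neg (by simp; omega)]
          rw [ihr]
          conv_rhs => rw [hsplit]
          rw [hrun, specK_zeros k hk _ 0 _ (head_dropWhile cs')]
          simp [hlen]
        · rw [List.filter_cons_of_pos (by simp; omega)]
          simp only [List.flatten_cons]
          rw [ihr]
          conv_rhs => rw [hsplit]
          rw [hrun, specK_zeros k hk _ 0 _ (head_dropWhile cs')]
          rw [if_neg (by omega)]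
          have htake : List.takeWhile (· == '0') cs'
              = List.replicate (List.takeWhile (· == '0') cs').length '0' := by
            have h2 := hrun
            rw [List.replicate_succ] at h2
            simpa using h2
          conv_lhs => rw [htake]
          simp [List.replicate_succ]
      · rw [List.filter_cons_of_pos (by simp [hc])]
        simp only [List.flatten_cons]
        rw [ihr]
        conv_rhs => rw [hsplit]
        rw [specK_nonzero k hk _ _ ?_]
        intro x hx
        rcases List.mem_cons.mp hx with h | h
        · exact h ▸ hc
        · exact (takeWhile_all cs' x h) ▸ hc

theorem join_map_ofList (rs : List (List Char)) :
    String.join (rs.map (fun r => String.ofList r)) = String.ofList rs.flatten := by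
  induction rs with
  | nil => rfl
  | cons r t ih => rw [List.map_cons, join_cons, ih, List.flatten_cons, ofList_append]

theorem removeKZeros_eq (str1 : Option String) (k : Int) :
    removeKZeros str1 k = removeKZeros_alt str1 k := by
  cases str1 with
  | none => rfl
  | some s =>
    by_cases hk : k < 1
    · simp [removeKZeros, removeKZeros_alt, hk]
    · have hk' : 1 ≤ k := by omega
      simp only [removeKZeros, removeKZeros_alt, if_neg hk]
      have hA := pvLoopA_spec k hk' s.toList [] 0
      simp only [List.length_nil, List.replicate_zero, List.nil_append, List.append_nil,
        Nat.zero_add, Nat.cast_zero, reduceIte] at hA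
      rw [show List.range (s.toList.map pvSing).length
          = List.range' 0 s.toList.length by rw [List.range_eq_range']; simp]
      rw [hA]
      congr 1
      set r := runA k [] 0 s.toList with hr
      have hfin : (if ((r.2 : Int)) = k
            then pvBlank (r.1 ++ List.replicate r.2 "0")
              (if r.2 = 0 then -1 else (r.1.length : Int)) (r.2 : Int)
            else r.1 ++ List.replicate r.2 "0")
          = (if ((r.2 : Int)) = k then r.1 ++ List.replicate r.2 ""
             else r.1 ++ List.replicate r.2 "0") := by
        by_cases hzk : ((r.2 : Int)) = k
        · have hz0 : r.2 ≠ 0 := by omega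
          rw [if_pos hzk, if_pos hzk, if_neg hz0]
          have := pvBlank_spec r.2 r.1 []
          simpa using this
        · rw [if_neg hzk, if_neg hzk]
      rw [hfin]
      have hJ := runA_join k hk' s.toList 0 []
      rw [← hr] at hJ
      rw [hJ, join_map_ofList, runsB_spec k hk' s.toList]
      simp [String.join]

-- ===== VERDICT (by name: the statement is the Claim_ definition above) =====
theorem removeKZeros_spec : Claim_equal_removeKZeros := by
  intro str1 k _
  unfold Spec_removeKZeros
  exact removeKZeros_eq str1 k
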